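-- pv_equiv track=rewrite | github.com/knedl1k/testing | HW06/tic_tac_toe.py | win_pos
-- ===== SOURCE A (Python) =====
-- def check(enc_x, enc_y, col, row, act_pos, matrix): #makes sure it stays in the array
--     if(enc_x>0 and col + abs(act_pos * enc_x) > (len(matrix[0]) - 1)):
--         return False
--     elif(enc_x < 0 and col - abs(act_pos * enc_x) < 0):
--         return False
--     if(enc_y>0 and row + abs(act_pos * enc_y) > len(matrix) - 1):
--         return False
--     elif(enc_y < 0 and row - abs(act_pos * enc_y) < 0):
--         return False
--     return True
--
-- def win_pos(matrix, char, enc_x, enc_y):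
--     seq_num = 0
--     win_row, win_col = -1, -1
--     win_amount = 5
--     for row in range(len(matrix)):
--         for col in range(len(matrix[0])):
--             if (matrix[row][col] == char):
--                 seq_num += 1
--                 for i in range(1, win_amount+1):
--                     if (not check(enc_x, enc_y, col, row, i, matrix)):
--                         break
--                     if (matrix[row + (i * enc_y)][col + (i * enc_x)] == char):
--                         seq_num += 1
--                     elif (matrix[row + (i * enc_y)][col + (i * enc_x)] == '.' and seq_num == win_amount - 1):
--                         win_row = row + i * enc_y
--                         win_col = col + i * enc_x
--                         return win_row, win_col
--                     else:
--                         break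
--             seq_num = 0
--     return -1, -1
-- ===== SOURCE B (Python) =====
-- def win_pos(matrix, char, enc_x, enc_y):
--     # a "near win" needs an empty cell '.', which cannot also be the player's char
--     if char == '.':
--         return -1, -1
--     rows = len(matrix)
--     cols = len(matrix[0]) if matrix else 0
--     for row in range(rows):
--         for col in range(cols):
--             if matrix[row][col] != char:
--                 continue
--             er, ec = row + 4 * enc_y, col + 4 * enc_x
--             if 0 <= er < rows and 0 <= ec < cols \
--                and all(matrix[row + i * enc_y][col + i * enc_x] == char for i in range(1, 4)) \
--                and matrix[er][ec] == '.':
--                 return er, ec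
--     return -1, -1
-- ===== Notes on version B (the rewrite author's own statement) =====
-- stated objective: simpler
-- what changed: Replaces the seq_num accumulator, the per-step check() bounds helper and the dual-break inner loop with one fixed-window test per candidate start cell: a single endpoint bounds check plus a 3-cell all() and a final '.' test.
-- outside the precondition, e.g. on win_pos([['X', 'X', 'X', 'X', '.'], ['.']], 'X', 1, 0): A returns (0, 4), B returns (0, 4)
import Mathlib
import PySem

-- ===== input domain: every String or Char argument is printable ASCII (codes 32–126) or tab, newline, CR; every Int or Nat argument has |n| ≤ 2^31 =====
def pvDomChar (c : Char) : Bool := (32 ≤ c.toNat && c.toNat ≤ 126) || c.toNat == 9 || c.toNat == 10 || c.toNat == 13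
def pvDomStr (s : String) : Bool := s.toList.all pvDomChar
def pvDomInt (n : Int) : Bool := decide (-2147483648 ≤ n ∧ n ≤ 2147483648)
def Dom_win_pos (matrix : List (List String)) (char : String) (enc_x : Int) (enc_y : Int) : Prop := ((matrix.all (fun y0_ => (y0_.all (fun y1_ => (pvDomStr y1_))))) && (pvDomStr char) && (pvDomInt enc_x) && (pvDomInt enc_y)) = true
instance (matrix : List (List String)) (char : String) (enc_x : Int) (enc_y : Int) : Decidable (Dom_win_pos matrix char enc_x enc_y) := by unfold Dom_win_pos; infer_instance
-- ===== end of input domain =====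

-- B replaces A's seq_num accumulator, per-step check() helper and dual-break inner loop
-- by a single fixed-window test per candidate start cell (objective: simpler).

-- ===== PORT A =====
-- matrix[r][c]; inside Pre_ every access A performs is in range, so the defaults never fire
def pvCell (matrix : List (List String)) (r c : Int) : String :=
  (PySem.List.pyGet? ((PySem.List.pyGet? matrix r).getD []) c).getD ""

-- len(matrix[0]); only evaluated by A when matrix is nonempty
def pvRow0Len (matrix : List (List String)) : Int := ((matrix.headD []).length : Int)

def check (enc_x : Int) (enc_y : Int) (col : Int) (row : Int) (act_pos : Int)
    (matrix : List (List String)) : Bool :=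
  if enc_x > 0 ∧ col + |act_pos * enc_x| > pvRow0Len matrix - 1 then false
  else if enc_x < 0 ∧ col - |act_pos * enc_x| < 0 then false
  else if enc_y > 0 ∧ row + |act_pos * enc_y| > (matrix.length : Int) - 1 then false
  else if enc_y < 0 ∧ row - |act_pos * enc_y| < 0 then false
  else true

-- the 'for i in range(1, win_amount+1)' loop; seq_num is the accumulator, none = loop broke / fell through
def pvInnerA (matrix : List (List String)) (char : String) (enc_x enc_y row col : Int) :
    List Int → Int → Option (Int × Int)
  | [], _ => none
  | i :: rest, seq_num =>
    if check enc_x enc_y col row i matrix = false then none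
    else if pvCell matrix (row + i * enc_y) (col + i * enc_x) = char then
      pvInnerA matrix char enc_x enc_y row col rest (seq_num + 1)
    else if pvCell matrix (row + i * enc_y) (col + i * enc_x) = "." ∧ seq_num = 4 then
      some (row + i * enc_y, col + i * enc_x)
    else none

-- 'for col in range(len(matrix[0]))'; seq_num enters the inner loop as 0+1 = 1
def pvColsA (matrix : List (List String)) (char : String) (enc_x enc_y row : Int) :
    List Int → Option (Int × Int)
  | [] => none
  | col :: rest =>
    if pvCell matrix row col = char then
      match pvInnerA matrix char enc_x enc_y row col (PySem.List.pyRange 1 6 1) 1 with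
      | some p => some p
      | none => pvColsA matrix char enc_x enc_y row rest
    else pvColsA matrix char enc_x enc_y row rest

-- 'for row in range(len(matrix))'
def pvRowsA (matrix : List (List String)) (char : String) (enc_x enc_y : Int) :
    List Int → Option (Int × Int)
  | [] => none
  | row :: rest =>
    match pvColsA matrix char enc_x enc_y row (PySem.List.pyRange 0 (pvRow0Len matrix) 1) with
    | some p => some p
    | none => pvRowsA matrix char enc_x enc_y rest

def win_pos (matrix : List (List String)) (char : String) (enc_x : Int) (enc_y : Int) : Int × Int :=
  (pvRowsA matrix char enc_x enc_y (PySem.List.pyRange 0 (matrix.length : Int) 1)).getD (-1, -1)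

-- ===== PORT B =====
-- the single window predicate of Source B: endpoint in bounds, cells 1..3 equal char, endpoint '.'
def pvWindowB (matrix : List (List String)) (char : String) (enc_x enc_y : Int)
    (rows cols row col : Int) : Bool :=
  decide (0 ≤ row + 4 * enc_y ∧ row + 4 * enc_y < rows ∧ 0 ≤ col + 4 * enc_x ∧ col + 4 * enc_x < cols)
  && (PySem.List.pyRange 1 4 1).all
       (fun i => pvCell matrix (row + i * enc_y) (col + i * enc_x) == char)
  && (pvCell matrix (row + 4 * enc_y) (col + 4 * enc_x) == ".")

def pvColsB (matrix : List (List String)) (char : String) (enc_x enc_y rows cols row : Int) :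
    List Int → Option (Int × Int)
  | [] => none
  | col :: rest =>
    if pvCell matrix row col ≠ char then pvColsB matrix char enc_x enc_y rows cols row rest
    else if pvWindowB matrix char enc_x enc_y rows cols row col then
      some (row + 4 * enc_y, col + 4 * enc_x)
    else pvColsB matrix char enc_x enc_y rows cols row rest

def pvRowsB (matrix : List (List String)) (char : String) (enc_x enc_y rows cols : Int) :
    List Int → Option (Int × Int)
  | [] => none
  | row :: rest =>
    match pvColsB matrix char enc_x enc_y rows cols row (PySem.List.pyRange 0 cols 1) with
    | some p => some p
    | none => pvRowsB matrix char enc_x enc_y rows cols rest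

def win_pos_alt (matrix : List (List String)) (char : String) (enc_x : Int) (enc_y : Int) : Int × Int :=
  if char = "." then (-1, -1)
  else
    (pvRowsB matrix char enc_x enc_y (matrix.length : Int) ((matrix.headD []).length : Int)
      (PySem.List.pyRange 0 (matrix.length : Int) 1)).getD (-1, -1)

-- ===== PRECONDITION & SPEC =====
-- Pre_ excludes ragged matrices (some row shorter than the first row): there A raises
-- IndexError, except when a window is found before the short row is reached (then both return it).
def Pre_win_pos (matrix : List (List String)) (char : String) (enc_x : Int) (enc_y : Int) : Prop :=
  ∀ r ∈ matrix, (matrix.headD []).length ≤ r.length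

instance (matrix : List (List String)) (char : String) (enc_x : Int) (enc_y : Int) : Decidable (Pre_win_pos matrix char enc_x enc_y) := by unfold Pre_win_pos; infer_instance

def pvWitness_win_pos : List (List String) × String × Int × Int :=
  ([["X", "X", "X", "X", "."]], "X", 1, 0)

def Spec_win_pos (matrix : List (List String)) (char : String) (enc_x : Int) (enc_y : Int) (out : Int × Int) : Prop := out = win_pos_alt matrix char enc_x enc_y
instance (matrix : List (List String)) (char : String) (enc_x : Int) (enc_y : Int) (out : Int × Int) : Decidable (Spec_win_pos matrix char enc_x enc_y out) := by unfold Spec_win_pos; infer_instance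

-- ===== CLAIM (what is proved, stated in full; the proofs are below) =====
def Claim_equal_win_pos : Prop := ∀ (matrix : List (List String)) (char : String) (enc_x : Int) (enc_y : Int), Dom_win_pos matrix char enc_x enc_y → Pre_win_pos matrix char enc_x enc_y → Spec_win_pos matrix char enc_x enc_y (win_pos matrix char enc_x enc_y)

-- ===== LEMMAS AND PROOFS =====

-- A's bounds helper, evaluated at step i > 0, says exactly 'the step-i cell is in range'
lemma check_iff (matrix : List (List String)) (enc_x enc_y col row i : Int) (hi : 0 < i)
    (hr : 0 ≤ row ∧ row < (matrix.length : Int))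
    (hc : 0 ≤ col ∧ col < pvRow0Len matrix) :
    check enc_x enc_y col row i matrix = true ↔
      (0 ≤ row + i * enc_y ∧ row + i * enc_y < (matrix.length : Int) ∧
       0 ≤ col + i * enc_x ∧ col + i * enc_x < pvRow0Len matrix) := by
  have hsx : (0 < enc_x ∧ |i * enc_x| = i * enc_x ∧ 0 < i * enc_x) ∨ (enc_x = 0 ∧ i * enc_x = 0) ∨
      (enc_x < 0 ∧ |i * enc_x| = -(i * enc_x) ∧ i * enc_x < 0) := by
    rcases lt_trichotomy enc_x 0 with h | h | h
    · exact Or.inr (Or.inr ⟨h, abs_of_neg (mul_neg_of_pos_of_neg hi h), mul_neg_of_pos_of_neg hi h⟩)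
    · exact Or.inr (Or.inl ⟨h, by simp [h]⟩)
    · exact Or.inl ⟨h, abs_of_pos (mul_pos hi h), mul_pos hi h⟩
  have hsy : (0 < enc_y ∧ |i * enc_y| = i * enc_y ∧ 0 < i * enc_y) ∨ (enc_y = 0 ∧ i * enc_y = 0) ∨
      (enc_y < 0 ∧ |i * enc_y| = -(i * enc_y) ∧ i * enc_y < 0) := by
    rcases lt_trichotomy enc_y 0 with h | h | h
    · exact Or.inr (Or.inr ⟨h, abs_of_neg (mul_neg_of_pos_of_neg hi h), mul_neg_of_pos_of_neg hi h⟩)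
    · exact Or.inr (Or.inl ⟨h, by simp [h]⟩)
    · exact Or.inl ⟨h, abs_of_pos (mul_pos hi h), mul_pos hi h⟩
  unfold check
  set u := i * enc_x with hu
  set v := i * enc_y with hv
  split_ifs with h1 h2 h3 h4 <;> simp <;> omega

-- the in-bounds condition of the window endpoint implies it at every earlier step
lemma bounds_mono (matrix : List (List String)) (enc_x enc_y row col i : Int)
    (hi : 0 ≤ i ∧ i ≤ 4)
    (hr : 0 ≤ row ∧ row < (matrix.length : Int))
    (hc : 0 ≤ col ∧ col < pvRow0Len matrix)
    (hb : 0 ≤ row + 4 * enc_y ∧ row + 4 * enc_y < (matrix.length : Int) ∧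
          0 ≤ col + 4 * enc_x ∧ col + 4 * enc_x < pvRow0Len matrix) :
    0 ≤ row + i * enc_y ∧ row + i * enc_y < (matrix.length : Int) ∧
    0 ≤ col + i * enc_x ∧ col + i * enc_x < pvRow0Len matrix := by
  rcases le_total 0 enc_x with hx | hx
  · have h1 : 0 ≤ i * enc_x := mul_nonneg hi.1 hx
    have h2 : i * enc_x ≤ 4 * enc_x := mul_le_mul_of_nonneg_right hi.2 hx
    rcases le_total 0 enc_y with hy | hy
    · have h3 : 0 ≤ i * enc_y := mul_nonneg hi.1 hy
      have h4 : i * enc_y ≤ 4 * enc_y := mul_le_mul_of_nonneg_right hi.2 hy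
      omega
    · have h3 : i * enc_y ≤ 0 := mul_nonpos_of_nonneg_of_nonpos hi.1 hy
      have h4 : 4 * enc_y ≤ i * enc_y := mul_le_mul_of_nonpos_right hi.2 hy
      omega
  · have h1 : i * enc_x ≤ 0 := mul_nonpos_of_nonneg_of_nonpos hi.1 hx
    have h2 : 4 * enc_x ≤ i * enc_x := mul_le_mul_of_nonpos_right hi.2 hx
    rcases le_total 0 enc_y with hy | hy
    · have h3 : 0 ≤ i * enc_y := mul_nonneg hi.1 hy
      have h4 : i * enc_y ≤ 4 * enc_y := mul_le_mul_of_nonneg_right hi.2 hy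
      omega
    · have h3 : i * enc_y ≤ 0 := mul_nonpos_of_nonneg_of_nonpos hi.1 hy
      have h4 : 4 * enc_y ≤ i * enc_y := mul_le_mul_of_nonpos_right hi.2 hy
      omega

-- per start cell: A's inner loop returns exactly what B's window predicate dictates
lemma inner_eq (matrix : List (List String)) (char : String) (enc_x enc_y row col : Int)
    (hr : 0 ≤ row ∧ row < (matrix.length : Int))
    (hc : 0 ≤ col ∧ col < pvRow0Len matrix)
    (hdot : char ≠ ".") :
    pvInnerA matrix char enc_x enc_y row col (PySem.List.pyRange 1 6 1) 1 =
      (if pvWindowB matrix char enc_x enc_y (matrix.length : Int) (pvRow0Len matrix) row col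
       then some (row + 4 * enc_y, col + 4 * enc_x) else none) := by
  have hlist : PySem.List.pyRange 1 6 1 = [1, 2, 3, 4, 5] := by decide
  have hall : PySem.List.pyRange 1 4 1 = [1, 2, 3] := by decide
  rw [hlist]
  by_cases hB : (0 ≤ row + 4 * enc_y ∧ row + 4 * enc_y < (matrix.length : Int) ∧
      0 ≤ col + 4 * enc_x ∧ col + 4 * enc_x < pvRow0Len matrix)
  · have hc1 : check enc_x enc_y col row 1 matrix = true :=
      (check_iff matrix enc_x enc_y col row 1 (by norm_num) hr hc).2
        (bounds_mono matrix enc_x enc_y row col 1 (by norm_num) hr hc hB)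
    have hc2 : check enc_x enc_y col row 2 matrix = true :=
      (check_iff matrix enc_x enc_y col row 2 (by norm_num) hr hc).2
        (bounds_mono matrix enc_x enc_y row col 2 (by norm_num) hr hc hB)
    have hc3 : check enc_x enc_y col row 3 matrix = true :=
      (check_iff matrix enc_x enc_y col row 3 (by norm_num) hr hc).2
        (bounds_mono matrix enc_x enc_y row col 3 (by norm_num) hr hc hB)
    have hc4 : check enc_x enc_y col row 4 matrix = true :=
      (check_iff matrix enc_x enc_y col row 4 (by norm_num) hr hc).2
        (bounds_mono matrix enc_x enc_y row col 4 (by norm_num) hr hc hB)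
    simp only [pvInnerA, hc1, hc2, hc3, hc4, pvWindowB, hall, hB, List.all_cons, List.all_nil,
      one_mul]
    generalize pvCell matrix (row + enc_y) (col + enc_x) = a1
    generalize pvCell matrix (row + 2 * enc_y) (col + 2 * enc_x) = a2
    generalize pvCell matrix (row + 3 * enc_y) (col + 3 * enc_x) = a3
    generalize pvCell matrix (row + 4 * enc_y) (col + 4 * enc_x) = a4
    generalize pvCell matrix (row + 5 * enc_y) (col + 5 * enc_x) = a5
    clear hc1 hc2 hc3 hc4 hB hr hc hlist hall
    split_ifs <;> simp_all
  · have hc4 : check enc_x enc_y col row 4 matrix = false := by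
      cases h : check enc_x enc_y col row 4 matrix
      · rfl
      · exact absurd ((check_iff matrix enc_x enc_y col row 4 (by norm_num) hr hc).1 h) hB
    have hw : pvWindowB matrix char enc_x enc_y (matrix.length : Int) (pvRow0Len matrix) row col
        = false := by simp [pvWindowB, hB]
    rw [hw]
    simp only [pvInnerA, hc4, one_mul]
    generalize pvCell matrix (row + enc_y) (col + enc_x) = a1
    generalize pvCell matrix (row + 2 * enc_y) (col + 2 * enc_x) = a2
    generalize pvCell matrix (row + 3 * enc_y) (col + 3 * enc_x) = a3
    generalize pvCell matrix (row + 4 * enc_y) (col + 4 * enc_x) = a4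
    generalize pvCell matrix (row + 5 * enc_y) (col + 5 * enc_x) = a5
    clear hc4 hw hB hr hc hlist hall
    split_ifs <;> simp_all

-- A's column loop equals B's column loop
lemma cols_eq (matrix : List (List String)) (char : String) (enc_x enc_y row : Int)
    (hr : 0 ≤ row ∧ row < (matrix.length : Int)) (hdot : char ≠ ".") :
    ∀ l : List Int, (∀ c ∈ l, 0 ≤ c ∧ c < pvRow0Len matrix) →
    pvColsA matrix char enc_x enc_y row l =
      pvColsB matrix char enc_x enc_y (matrix.length : Int) (pvRow0Len matrix) row l := by
  intro l
  induction l with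
  | nil => intro _; rfl
  | cons c rest ih =>
    intro hmem
    have hcb := hmem c (by simp)
    have hrest : ∀ c ∈ rest, 0 ≤ c ∧ c < pvRow0Len matrix := fun x hx => hmem x (by simp [hx])
    by_cases hch : pvCell matrix row c = char
    · rw [pvColsA, pvColsB, if_pos hch, if_neg (by simp [hch]),
        inner_eq matrix char enc_x enc_y row c hr hcb hdot]
      by_cases hw : pvWindowB matrix char enc_x enc_y (matrix.length : Int) (pvRow0Len matrix) row c = true
      · simp [hw]
      · simp only [Bool.not_eq_true] at hw
        simp [hw, ih hrest]
    · rw [pvColsA, pvColsB, if_neg hch, if_pos hch, ih hrest]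

lemma rows_eq (matrix : List (List String)) (char : String) (enc_x enc_y : Int)
    (hdot : char ≠ ".") :
    ∀ l : List Int, (∀ r ∈ l, 0 ≤ r ∧ r < (matrix.length : Int)) →
    pvRowsA matrix char enc_x enc_y l =
      pvRowsB matrix char enc_x enc_y (matrix.length : Int) (pvRow0Len matrix) l := by
  intro l
  induction l with
  | nil => intro _; rfl
  | cons r rest ih =>
    intro hmem
    have hrb := hmem r (by simp)
    have hrest : ∀ x ∈ rest, 0 ≤ x ∧ x < (matrix.length : Int) := fun x hx => hmem x (by simp [hx])
    rw [pvRowsA, pvRowsB, cols_eq matrix char enc_x enc_y r hrb hdot _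
      (fun c hcm => ((PySem.List.mem_pyRange_one).1 hcm)), ih hrest]

-- searching for '.' itself: A's elif branch can never fire, so A returns (-1, -1)
lemma innerA_dot (matrix : List (List String)) (enc_x enc_y row col : Int) :
    ∀ (l : List Int) (s : Int),
    pvInnerA matrix "." enc_x enc_y row col l s = none := by
  intro l
  induction l with
  | nil => intro s; rfl
  | cons i rest ih =>
    intro s
    rw [pvInnerA]
    split_ifs with h1 h2 h3
    · rfl
    · exact ih (s + 1)
    · exact absurd h3.1 h2
    · rfl

lemma colsA_dot (matrix : List (List String)) (enc_x enc_y row : Int) :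
    ∀ l : List Int, pvColsA matrix "." enc_x enc_y row l = none := by
  intro l
  induction l with
  | nil => rfl
  | cons c rest ih =>
    rw [pvColsA]
    split_ifs with h
    · rw [innerA_dot]; exact ih
    · exact ih

lemma rowsA_dot (matrix : List (List String)) (enc_x enc_y : Int) :
    ∀ l : List Int, pvRowsA matrix "." enc_x enc_y l = none := by
  intro l
  induction l with
  | nil => rfl
  | cons r rest ih => rw [pvRowsA, colsA_dot]; exact ih

-- ===== VERDICT (by name: the statement is the Claim_ definition above) =====
theorem win_pos_spec : Claim_equal_win_pos := by
  intro matrix char enc_x enc_y _ hpre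
  unfold Spec_win_pos win_pos win_pos_alt
  by_cases hdot : char = "."
  · subst hdot; rw [rowsA_dot]; rfl
  · rw [if_neg hdot, rows_eq matrix char enc_x enc_y hdot _
      (fun r hrm => ((PySem.List.mem_pyRange_one).1 hrm))]
    rfl
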